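-- pv_equiv track=rewrite | github.com/Dish365/data_collect | backend/analytics/app/api/v1/endpoints/qualitative.py | _identify_content_types
-- ===== SOURCE A (Python) =====
-- from typing import Dict, Any, List, Optional
--
-- def _identify_content_types(texts: List[str]) -> Dict[str, int]:
--     """Identify types of content in texts."""
--     content_types = {
--         "narrative": 0,
--         "descriptive": 0,
--         "opinion": 0,
--         "factual": 0,
--         "question_response": 0
--     }
--
--     for text in texts:
--         text_lower = text.lower()
--
--         # Narrative indicators
--         if any(word in text_lower for word in ['story', 'happened', 'then', 'after', 'before']):
--             content_types["narrative"] += 1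
--
--         # Opinion indicators
--         if any(word in text_lower for word in ['think', 'believe', 'opinion', 'feel', 'should']):
--             content_types["opinion"] += 1
--
--         # Question response indicators
--         if any(word in text_lower for word in ['answer', 'response', 'question']):
--             content_types["question_response"] += 1
--
--         # Default to descriptive if no clear type
--         if not any([
--             any(word in text_lower for word in ['story', 'happened', 'then']),
--             any(word in text_lower for word in ['think', 'believe', 'opinion']),
--             any(word in text_lower for word in ['answer', 'response', 'question'])
--         ]):
--             content_types["descriptive"] += 1
--
--     return content_types
-- ===== SOURCE B (Python) =====
-- NARRATIVE = ['story', 'happened', 'then', 'after', 'before']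
-- OPINION = ['think', 'believe', 'opinion', 'feel', 'should']
-- QUESTION = ['answer', 'response', 'question']
-- # keywords whose presence prevents the "descriptive" default
-- CORE = NARRATIVE[:3] + OPINION[:3] + QUESTION
--
--
-- def _identify_content_types(texts):
--     lows = [t.lower() for t in texts]
--
--     def hits(keywords):
--         return sum(1 for t in lows if any(k in t for k in keywords))
--
--     return {
--         "narrative": hits(NARRATIVE),
--         "descriptive": len(lows) - hits(CORE),
--         "opinion": hits(OPINION),
--         "factual": 0,
--         "question_response": hits(QUESTION),
--     }
-- ===== Notes on version B (the rewrite author's own statement) =====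
-- stated objective: alternative
-- what changed: B lowercases all texts once, then computes each counter in its own independent counting pass (hits(keywords)) and derives descriptive as len(texts) minus the number of texts hitting the core-trigger keywords, instead of A's single pass mutating a dict with four branch increments per text.
import Mathlib
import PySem

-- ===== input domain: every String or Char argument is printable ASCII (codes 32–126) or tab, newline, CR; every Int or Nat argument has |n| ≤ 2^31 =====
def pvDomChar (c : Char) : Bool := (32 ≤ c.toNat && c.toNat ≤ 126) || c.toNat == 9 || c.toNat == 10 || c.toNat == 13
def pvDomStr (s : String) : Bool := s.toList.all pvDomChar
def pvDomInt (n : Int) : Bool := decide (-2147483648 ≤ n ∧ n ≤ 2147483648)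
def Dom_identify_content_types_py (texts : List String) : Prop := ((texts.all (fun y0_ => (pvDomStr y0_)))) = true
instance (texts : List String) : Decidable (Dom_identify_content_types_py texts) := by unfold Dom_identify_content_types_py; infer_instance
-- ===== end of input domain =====

-- B replaces A's single dict-mutating pass with staged per-category counting passes over
-- the pre-lowercased texts, deriving descriptive by complement (objective: alternative).


-- ===== PORT A =====
def aStep (d : PySem.Dict String Int) (text : String) : PySem.Dict String Int :=
  let tl := PySem.Str.lower text
  let d1 := if (["story", "happened", "then", "after", "before"].any
      (fun w => PySem.Str.isIn w tl)) then d.insert "narrative" (d.getD "narrative" 0 + 1) else d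
  let d2 := if (["think", "believe", "opinion", "feel", "should"].any
      (fun w => PySem.Str.isIn w tl)) then d1.insert "opinion" (d1.getD "opinion" 0 + 1) else d1
  let d3 := if (["answer", "response", "question"].any
      (fun w => PySem.Str.isIn w tl)) then d2.insert "question_response" (d2.getD "question_response" 0 + 1) else d2
  if !([(["story", "happened", "then"].any (fun w => PySem.Str.isIn w tl)),
        (["think", "believe", "opinion"].any (fun w => PySem.Str.isIn w tl)),
        (["answer", "response", "question"].any (fun w => PySem.Str.isIn w tl))].any id)
  then d3.insert "descriptive" (d3.getD "descriptive" 0 + 1) else d3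

def identify_content_types_py (texts : List String) : List (String × Int) :=
  (texts.foldl aStep (PySem.Dict.ofList
    [("narrative", 0), ("descriptive", 0), ("opinion", 0), ("factual", 0), ("question_response", 0)])).items

-- ===== PORT B =====
def bNarrative : List String := ["story", "happened", "then", "after", "before"]
def bOpinion : List String := ["think", "believe", "opinion", "feel", "should"]
def bQuestion : List String := ["answer", "response", "question"]
def bCore : List String := bNarrative.take 3 ++ bOpinion.take 3 ++ bQuestion

-- sum(1 for t in lows if any(k in t for k in keywords))
def bHits (lows : List String) (keywords : List String) : Int :=
  (lows.countP (fun t => keywords.any (fun k => PySem.Str.isIn k t)) : Int)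

def identify_content_types_py_alt (texts : List String) : List (String × Int) :=
  let lows := texts.map PySem.Str.lower
  [("narrative", bHits lows bNarrative),
   ("descriptive", (lows.length : Int) - bHits lows bCore),
   ("opinion", bHits lows bOpinion),
   ("factual", 0),
   ("question_response", bHits lows bQuestion)]

-- ===== PRECONDITION & SPEC =====
def Spec_identify_content_types_py (texts : List String) (out : List (String × Int)) : Prop := out = identify_content_types_py_alt texts
instance (texts : List String) (out : List (String × Int)) : Decidable (Spec_identify_content_types_py texts out) := by unfold Spec_identify_content_types_py; infer_instance

-- ===== CLAIM (what is proved, stated in full; the proofs are below) =====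
def Claim_equal_identify_content_types_py : Prop := ∀ (texts : List String), Dom_identify_content_types_py texts → Spec_identify_content_types_py texts (identify_content_types_py texts)

-- ===== LEMMAS AND PROOFS =====

-- A's dict always has this concrete shape
def mk5 (s : Int × Int × Int × Int) : PySem.Dict String Int :=
  PySem.Dict.mk [("narrative", s.1), ("descriptive", s.2.1), ("opinion", s.2.2.1),
    ("factual", 0), ("question_response", s.2.2.2)]

def ind (b : Bool) : Int := if b then 1 else 0

def bMatch (kws : List String) (tl : String) : Bool := kws.any (fun k => PySem.Str.isIn k tl)

set_option maxHeartbeats 1000000 in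
theorem step_eq (n d o q : Int) (t : String) :
    aStep (mk5 (n, d, o, q)) t
      = mk5 (n + ind (bMatch bNarrative (PySem.Str.lower t)),
             d + (1 - ind (bMatch bCore (PySem.Str.lower t))),
             o + ind (bMatch bOpinion (PySem.Str.lower t)),
             q + ind (bMatch bQuestion (PySem.Str.lower t))) := by
  have hdesc :
      (!([((["story", "happened", "then"] : List String).any (fun w => PySem.Str.isIn w (PySem.Str.lower t))),
          ((["think", "believe", "opinion"] : List String).any (fun w => PySem.Str.isIn w (PySem.Str.lower t))),
          ((["answer", "response", "question"] : List String).any (fun w => PySem.Str.isIn w (PySem.Str.lower t)))].any id))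
      = !(bMatch bCore (PySem.Str.lower t)) := by
    simp [bMatch, bCore, bNarrative, bOpinion, bQuestion, Bool.or_assoc]
  simp only [aStep, hdesc, bMatch, bNarrative, bOpinion, bQuestion, ind]
  split_ifs with h1 h2 h3 h4 <;>
    simp_all [mk5, PySem.Dict.insert, PySem.Dict.getD, PySem.Dict.get?] <;>
    (obtain ⟨x, hx, hpx⟩ := ‹∃ x ∈ bCore, PySem.Chars.isIn x.toList (PySem.Chars.lower t.toList) = true›;
     exact absurd hpx (by simp [h1 x hx]))

theorem fold_eq (texts : List String) (n d o q : Int) :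
    texts.foldl aStep (mk5 (n, d, o, q))
      = mk5 (n + bHits (texts.map PySem.Str.lower) bNarrative,
             d + ((texts.length : Int) - bHits (texts.map PySem.Str.lower) bCore),
             o + bHits (texts.map PySem.Str.lower) bOpinion,
             q + bHits (texts.map PySem.Str.lower) bQuestion) := by
  induction texts generalizing n d o q with
  | nil => simp [bHits]
  | cons t ts ih =>
    rw [List.foldl_cons, step_eq, ih]
    have hcnt : ∀ kws : List String,
        bHits ((t :: ts).map PySem.Str.lower) kws
          = ind (bMatch kws (PySem.Str.lower t)) + bHits (ts.map PySem.Str.lower) kws := by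
      intro kws
      simp only [bHits, List.map_cons, List.countP_cons, bMatch, ind]
      split_ifs <;> simp_all <;> omega
    simp only [hcnt, List.length_cons, mk5]
    congr 1 <;> push_cast <;> ring_nf

-- ===== VERDICT (by name: the statement is the Claim_ definition above) =====
theorem identify_content_types_py_spec : Claim_equal_identify_content_types_py := by
  intro texts _
  unfold Spec_identify_content_types_py identify_content_types_py identify_content_types_py_alt
  have h0 : PySem.Dict.ofList
      [("narrative", (0:Int)), ("descriptive", 0), ("opinion", 0), ("factual", 0), ("question_response", 0)]
      = mk5 (0, 0, 0, 0) := by decide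
  rw [h0, fold_eq]
  simp [mk5]
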